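-- pv_equiv track=rewrite | github.com/cmark89/Gocore | client.py | input_to_point
-- ===== SOURCE A (Python) =====
-- columns = "ABCDEFGHIJKLMNOPQRS"
--
-- def input_to_point(space):
-- 	x = 0
-- 	y = 0
-- 	y = space[1:]
-- 	for index, row in enumerate(columns):
-- 		if space[0] == columns[index]:
-- 			x = index + 1
-- 	return str(x) + "-" + str(y)
-- ===== SOURCE B (Python) =====
-- columns = "ABCDEFGHIJKLMNOPQRS"
--
-- def input_to_point(space):
--     c = space[0]
--     x = ord(c) - ord('A') + 1 if 'A' <= c <= 'S' else 0
--     return str(x) + "-" + space[1:]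
-- ===== Notes on version B (the rewrite author's own statement) =====
-- stated objective: faster
-- what changed: Replaced the 19-iteration scan over the columns string with a single range-guarded character-arithmetic computation (ord(c) - ord('A') + 1).
-- outside the precondition, e.g. on input_to_point(''): A raises IndexError, B raises IndexError
import Mathlib
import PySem

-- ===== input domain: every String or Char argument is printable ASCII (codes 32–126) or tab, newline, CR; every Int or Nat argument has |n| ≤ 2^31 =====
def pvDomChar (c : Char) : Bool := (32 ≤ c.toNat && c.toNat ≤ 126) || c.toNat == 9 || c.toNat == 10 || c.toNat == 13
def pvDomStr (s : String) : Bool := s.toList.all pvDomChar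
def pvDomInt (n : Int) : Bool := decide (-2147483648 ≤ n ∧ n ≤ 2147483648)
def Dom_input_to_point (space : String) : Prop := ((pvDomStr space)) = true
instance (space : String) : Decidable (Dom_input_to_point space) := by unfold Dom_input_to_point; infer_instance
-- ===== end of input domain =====

-- B replaces A's scan over the 19-column string with one range-guarded character-arithmetic step (constant-factor speedup measured on this tiny task is advisory).

-- ===== PORT A =====
-- columns = "ABCDEFGHIJKLMNOPQRS"  (module-level constant, written as its char list)
def pvColumns : List Char := ['A','B','C','D','E','F','G','H','I','J','K','L','M','N','O','P','Q','R','S']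

def input_to_point (space : String) : String :=
  let cs := space.toList
  -- y = space[1:]
  let y := PySem.List.slice cs (some 1) none
  -- for index, row in enumerate(columns): if space[0] == columns[index]: x = index + 1
  -- (space[0] is cs[0]?; by the loop binding, columns[index] is the enumerated row p.2)
  let x : Int := (PySem.List.enumerate pvColumns 0).foldl
    (fun x p => if cs[0]? = some p.2 then p.1 + 1 else x) 0
  -- str(x) + "-" + str(y)
  String.ofList (PySem.Int.toChars x ++ '-' :: y)

-- ===== PORT B =====
def input_to_point_alt (space : String) : String :=
  match space.toList with
  | [] => ""   -- Python B raises IndexError here (space[0]); outside Pre_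
  | c :: rest =>
    -- x = ord(c) - ord('A') + 1 if 'A' <= c <= 'S' else 0;  str(x) + "-" + space[1:]
    let x : Int := if 'A' ≤ c ∧ c ≤ 'S' then (c.toNat : Int) - 65 + 1 else 0
    String.ofList (PySem.Int.toChars x ++ '-' :: rest)

-- ===== PRECONDITION & SPEC =====
-- Pre_ excludes only the empty string, on which both A and B raise IndexError at space[0].
def Pre_input_to_point (space : String) : Prop := space ≠ ""
instance (space : String) : Decidable (Pre_input_to_point space) := by unfold Pre_input_to_point; infer_instance
def pvWitness_input_to_point : String := "D4"

def Spec_input_to_point (space : String) (out : String) : Prop := out = input_to_point_alt space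
instance (space : String) (out : String) : Decidable (Spec_input_to_point space out) := by unfold Spec_input_to_point; infer_instance

-- ===== CLAIM (what is proved, stated in full; the proofs are below) =====
def Claim_equal_input_to_point : Prop := ∀ (space : String), Dom_input_to_point space → Pre_input_to_point space → Spec_input_to_point space (input_to_point space)

-- ===== LEMMAS AND PROOFS =====

theorem pv_char_eq_of_toNat {a b : Char} (h : a.toNat = b.toNat) : a = b := by
  apply Char.ext_iff.mpr
  unfold Char.toNat at h
  exact UInt32.toNat_inj.mp h

-- A's scan over the 19 columns equals B's range-guarded closed form, for any head character c.
theorem pv_scan_eq (c : Char) :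
    ((PySem.List.enumerate pvColumns 0).foldl
      (fun x p => if some c = some p.2 then p.1 + 1 else x) (0 : Int))
      = (if 'A' ≤ c ∧ c ≤ 'S' then (c.toNat : Int) - 65 + 1 else 0) := by
  simp only [pvColumns, PySem.List.enumerate_cons, PySem.List.enumerate_nil, List.foldl_cons, List.foldl_nil, Option.some.injEq]
  norm_num
  by_cases hS : c = 'S'
  · subst hS; decide
  rw [if_neg hS]
  by_cases hR : c = 'R'
  · subst hR; decide
  rw [if_neg hR]
  by_cases hQ : c = 'Q'
  · subst hQ; decide
  rw [if_neg hQ]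
  by_cases hP : c = 'P'
  · subst hP; decide
  rw [if_neg hP]
  by_cases hO : c = 'O'
  · subst hO; decide
  rw [if_neg hO]
  by_cases hN : c = 'N'
  · subst hN; decide
  rw [if_neg hN]
  by_cases hM : c = 'M'
  · subst hM; decide
  rw [if_neg hM]
  by_cases hL : c = 'L'
  · subst hL; decide
  rw [if_neg hL]
  by_cases hK : c = 'K'
  · subst hK; decide
  rw [if_neg hK]
  by_cases hJ : c = 'J'
  · subst hJ; decide
  rw [if_neg hJ]
  by_cases hI : c = 'I'
  · subst hI; decide
  rw [if_neg hI]
  by_cases hH : c = 'H'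
  · subst hH; decide
  rw [if_neg hH]
  by_cases hG : c = 'G'
  · subst hG; decide
  rw [if_neg hG]
  by_cases hF : c = 'F'
  · subst hF; decide
  rw [if_neg hF]
  by_cases hE : c = 'E'
  · subst hE; decide
  rw [if_neg hE]
  by_cases hD : c = 'D'
  · subst hD; decide
  rw [if_neg hD]
  by_cases hC : c = 'C'
  · subst hC; decide
  rw [if_neg hC]
  by_cases hB : c = 'B'
  · subst hB; decide
  rw [if_neg hB]
  by_cases hA : c = 'A'
  · subst hA; decide
  rw [if_neg hA]
  rw [if_neg]
  rintro ⟨ha, hb⟩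
  have ha' : 65 ≤ c.toNat := Nat.succ_le_of_lt ha
  have hb' : c.toNat ≤ 83 := Nat.lt_succ_iff.mp (Nat.lt_succ_of_le hb)
  have nA : c.toNat ≠ 65 := fun h => hA (pv_char_eq_of_toNat h)
  have nB : c.toNat ≠ 66 := fun h => hB (pv_char_eq_of_toNat h)
  have nC : c.toNat ≠ 67 := fun h => hC (pv_char_eq_of_toNat h)
  have nD : c.toNat ≠ 68 := fun h => hD (pv_char_eq_of_toNat h)
  have nE : c.toNat ≠ 69 := fun h => hE (pv_char_eq_of_toNat h)
  have nF : c.toNat ≠ 70 := fun h => hF (pv_char_eq_of_toNat h)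
  have nG : c.toNat ≠ 71 := fun h => hG (pv_char_eq_of_toNat h)
  have nH : c.toNat ≠ 72 := fun h => hH (pv_char_eq_of_toNat h)
  have nI : c.toNat ≠ 73 := fun h => hI (pv_char_eq_of_toNat h)
  have nJ : c.toNat ≠ 74 := fun h => hJ (pv_char_eq_of_toNat h)
  have nK : c.toNat ≠ 75 := fun h => hK (pv_char_eq_of_toNat h)
  have nL : c.toNat ≠ 76 := fun h => hL (pv_char_eq_of_toNat h)
  have nM : c.toNat ≠ 77 := fun h => hM (pv_char_eq_of_toNat h)
  have nN : c.toNat ≠ 78 := fun h => hN (pv_char_eq_of_toNat h)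
  have nO : c.toNat ≠ 79 := fun h => hO (pv_char_eq_of_toNat h)
  have nP : c.toNat ≠ 80 := fun h => hP (pv_char_eq_of_toNat h)
  have nQ : c.toNat ≠ 81 := fun h => hQ (pv_char_eq_of_toNat h)
  have nR : c.toNat ≠ 82 := fun h => hR (pv_char_eq_of_toNat h)
  have nS : c.toNat ≠ 83 := fun h => hS (pv_char_eq_of_toNat h)
  omega

-- ===== VERDICT (by name: the statement is the Claim_ definition above) =====
theorem input_to_point_spec : Claim_equal_input_to_point := by
  intro space _ hpre
  unfold Spec_input_to_point input_to_point input_to_point_alt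
  cases h : space.toList with
  | nil => exact absurd (String.toList_eq_nil_iff.mp h) hpre
  | cons c rest =>
    simp only [List.getElem?_cons_zero, PySem.List.slice_from_one, List.tail_cons]
    congr 3
    exact pv_scan_eq c
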